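-- pv_equiv track=rewrite | github.com/nowei/advent-of-code | curr/src/days/day01/run.py | part2
-- ===== SOURCE A (Python) =====
-- from typing import List, Tuple
-- from collections import Counter
--
-- def part2(_input: Tuple[List[int], List[int]]) -> int:
--     # Process left list in order, count instances in second list
--     first, second = _input
--     counts_second = Counter(second)
--     diff = 0
--     for key in first:
--         curr = key * counts_second.get(key, 0)
--         diff += curr
--     return diff
-- ===== SOURCE B (Python) =====
-- from typing import List, Tuple
--
-- def part2(_input: Tuple[List[int], List[int]]) -> int:
--     # Group-by worklist: handle each distinct left value once,
--     # weighting by its multiplicity in both lists; no Counter built.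
--     first, second = _input
--     total = 0
--     xs = list(first)
--     while xs:
--         x = xs[0]
--         total += x * xs.count(x) * second.count(x)
--         xs = [y for y in xs if y != x]
--     return total
-- ===== Notes on version B (the rewrite author's own statement) =====
-- stated objective: alternative
-- what changed: Replaces the Counter-of-second plus per-element loop with a group-by worklist: each distinct value of first is processed once, multiplied by its count in first and its count in second, and all its occurrences are filtered out of the worklist; no Counter or dict is built (slower on inputs with many distinct values).
import Mathlib
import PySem

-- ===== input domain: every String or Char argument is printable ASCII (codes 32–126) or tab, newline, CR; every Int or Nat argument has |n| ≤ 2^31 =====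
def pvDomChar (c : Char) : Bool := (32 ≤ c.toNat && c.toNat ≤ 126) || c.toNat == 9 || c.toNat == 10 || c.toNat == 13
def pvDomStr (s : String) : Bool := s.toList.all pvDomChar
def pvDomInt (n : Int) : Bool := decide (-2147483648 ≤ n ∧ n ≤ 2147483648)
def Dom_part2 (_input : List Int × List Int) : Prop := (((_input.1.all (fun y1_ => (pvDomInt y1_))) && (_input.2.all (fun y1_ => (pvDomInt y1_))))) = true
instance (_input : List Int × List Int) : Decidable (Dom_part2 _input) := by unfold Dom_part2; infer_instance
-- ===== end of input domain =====

-- B replaces the Counter-plus-loop with a group-by worklist over the distinct left values; alternative decomposition, not faster.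

-- ===== PORT A =====
def part2 (_input : List Int × List Int) : Int :=
  let first := _input.1
  let second := _input.2
  let counts_second := PySem.Dict.counter second
  let diff : Int := 0
  first.foldl (fun diff key =>
    let curr := key * counts_second.getD key 0
    diff + curr) diff

-- ===== PORT B =====
def part2AltGo (second : List Int) (xs : List Int) (total : Int) : Int :=
  match xs with
  | [] => total
  | x :: rest =>
      part2AltGo second ((x :: rest).filter (fun y => decide (y ≠ x)))
        (total + x * ((x :: rest).count x : Int) * (PySem.List.count second x : Int))
termination_by xs.length
decreasing_by
  simp only [List.filter_cons, ne_eq, not_true_eq_false, decide_false, List.length_cons]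
  exact Nat.lt_succ_of_le (List.length_filter_le _ rest)

def part2_alt (_input : List Int × List Int) : Int :=
  let first := _input.1
  let second := _input.2
  part2AltGo second first 0

-- ===== PRECONDITION & SPEC =====
def Spec_part2 (_input : List Int × List Int) (out : Int) : Prop := out = part2_alt _input
instance (_input : List Int × List Int) (out : Int) : Decidable (Spec_part2 _input out) := by unfold Spec_part2; infer_instance

-- ===== CLAIM (what is proved, stated in full; the proofs are below) =====
def Claim_equal_part2 : Prop := ∀ (_input : List Int × List Int), Dom_part2 _input → Spec_part2 _input (part2 _input)

-- ===== LEMMAS AND PROOFS =====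

-- Grouping: the sum over xs of f splits into the contribution of value x (count·f x) and the sum over the other values.
theorem pv_sum_split (f : Int → Int) (x : Int) (xs : List Int) :
    (xs.map f).sum = (xs.count x : Int) * f x + ((xs.filter (fun y => decide (y ≠ x))).map f).sum := by
  induction xs with
  | nil => simp
  | cons a t ih =>
    by_cases h : a = x
    · subst h
      simp only [List.map_cons, List.sum_cons, List.count_cons_self, List.filter_cons]
      simp only [ne_eq, not_true_eq_false, decide_false]
      push_cast
      rw [ih]; ring
    · simp only [List.map_cons, List.sum_cons, List.filter_cons]
      rw [List.count_cons_of_ne h]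
      have : (decide ¬a = x) = true := by simp [h]
      simp only [ne_eq, this, if_true]
      simp only [List.map_cons, List.sum_cons]
      rw [ih]; ring

theorem pv_go_eq_sum (second : List Int) (xs : List Int) (total : Int) :
    part2AltGo second xs total = total + (xs.map (fun k => k * (second.count k : Int))).sum := by
  induction xs, total using part2AltGo.induct second with
  | case1 t => simp [part2AltGo]
  | case2 t x rest ih =>
    rw [part2AltGo, ih]
    rw [pv_sum_split (fun k => k * (second.count k : Int)) x (x :: rest)]
    have hf : (x :: rest).filter (fun y => decide (y ≠ x)) = rest.filter (fun y => decide (y ≠ x)) := by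
      simp
    rw [hf]
    simp [PySem.List.count_eq]
    ring

-- ===== VERDICT (by name: the statement is the Claim_ definition above) =====
theorem part2_spec : Claim_equal_part2 := by
  intro input _hdom
  unfold Spec_part2 part2 part2_alt
  obtain ⟨first, second⟩ := input
  simp only []
  rw [pv_go_eq_sum]
  have := PySem.List.foldl_add (l := first) (a := (0 : Int))
    (g := fun key => key * (PySem.Dict.counter second).getD key 0)
  simp only [PySem.Dict.getD_counter] at this
  simpa using this
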